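-- pv_equiv track=rewrite | github.com/dniminenn/isekaiprotocol | oracle/isekai_seasonal_oracle.py | determine_token_id
-- ===== SOURCE A (Python) =====
-- def determine_token_id(random_number):
--     """
--     Determines the ID of the token to be minted based on probabilities.
--
--     Args:
--         random_number (int): A random number between 0 and 10000.
--
--     Returns:
--         int: The ID of the token to be minted.
--     """
--     probabilities = [2300, 2300, 2300, 700, 700, 700, 300, 300, 300, 49, 49, 2]
--     current_sum = 0
--
--     for i, probability in enumerate(probabilities):
--         current_sum += probability
--         if random_number < current_sum:
--             return i + 1
--     return 1
-- ===== SOURCE B (Python) =====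
-- # Precomputed cumulative thresholds + hand-written binary search (O(log n) lookup,
-- # no running sum); falls back to token 1 when random_number is past the last threshold.
-- _PREFIX = [2300, 4600, 6900, 7600, 8300, 9000, 9300, 9600, 9900, 9949, 9998, 10000]
--
-- def determine_token_id(random_number):
--     lo, hi = 0, len(_PREFIX)
--     while lo < hi:
--         mid = (lo + hi) // 2
--         if _PREFIX[mid] <= random_number:
--             lo = mid + 1
--         else:
--             hi = mid
--     return lo + 1 if lo < len(_PREFIX) else 1
-- ===== Notes on version B (the rewrite author's own statement) =====
-- stated objective: alternative
-- what changed: Replaces the running-sum linear scan with a precomputed cumulative-threshold table searched by a hand-written binary search (bisect_right logic), returning index+1 or 1 past the last threshold.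
import Mathlib
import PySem

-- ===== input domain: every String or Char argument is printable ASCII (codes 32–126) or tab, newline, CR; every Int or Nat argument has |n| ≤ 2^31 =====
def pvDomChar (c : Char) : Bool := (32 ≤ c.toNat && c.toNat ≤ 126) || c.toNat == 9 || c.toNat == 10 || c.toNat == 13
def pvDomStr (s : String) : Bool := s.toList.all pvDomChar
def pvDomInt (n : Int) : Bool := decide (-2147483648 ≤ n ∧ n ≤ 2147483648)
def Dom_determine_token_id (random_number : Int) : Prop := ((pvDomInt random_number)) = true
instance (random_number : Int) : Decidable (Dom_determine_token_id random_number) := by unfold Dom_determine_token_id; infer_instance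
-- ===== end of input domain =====

set_option maxRecDepth 4000


-- ===== PORT A =====
-- loop over enumerate(probabilities) carrying current_sum; early return i+1, fall-through 1
def pvLoopA (random_number : Int) : List (Int × Int) → Int → Int
  | [], _ => 1
  | (i, p) :: rest, s =>
      let s' := s + p
      if random_number < s' then i + 1 else pvLoopA random_number rest s'

def determine_token_id (random_number : Int) : Int :=
  let probabilities : List Int := [2300, 2300, 2300, 700, 700, 700, 300, 300, 300, 49, 49, 2]
  pvLoopA random_number (PySem.List.enumerate probabilities) 0

-- ===== PORT B =====
-- binary search over the precomputed cumulative thresholds (Source B's while loop)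
def pvPrefixB : List Int := [2300, 4600, 6900, 7600, 8300, 9000, 9300, 9600, 9900, 9949, 9998, 10000]

def pvBsearch (x : Int) (lo hi : Nat) : Nat :=
  if h : lo < hi then
    -- mid = (lo + hi) // 2, written inline
    if pvPrefixB.getD ((lo + hi) / 2) 0 ≤ x then pvBsearch x ((lo + hi) / 2 + 1) hi
    else pvBsearch x lo ((lo + hi) / 2)
  else lo
termination_by hi - lo
decreasing_by all_goals omega

def determine_token_id_alt (random_number : Int) : Int :=
  let lo := pvBsearch random_number 0 pvPrefixB.length
  if lo < pvPrefixB.length then (lo : Int) + 1 else 1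

-- ===== PRECONDITION & SPEC =====
def Spec_determine_token_id (random_number : Int) (out : Int) : Prop := out = determine_token_id_alt random_number
instance (random_number : Int) (out : Int) : Decidable (Spec_determine_token_id random_number out) := by unfold Spec_determine_token_id; infer_instance

-- ===== CLAIM (what is proved, stated in full; the proofs are below) =====
def Claim_equal_determine_token_id : Prop := ∀ (random_number : Int), Dom_determine_token_id random_number → Spec_determine_token_id random_number (determine_token_id random_number)

-- ===== LEMMAS AND PROOFS =====

-- ===== VERDICT (by name: the statement is the Claim_ definition above) =====
-- A's loop evaluated to a closed nested-if chain (used by the proof only)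
lemma pvA_char (n : Int) : determine_token_id n =
    (if n < 2300 then 1 else if n < 4600 then 2 else if n < 6900 then 3 else if n < 7600 then 4
     else if n < 8300 then 5 else if n < 9000 then 6 else if n < 9300 then 7 else if n < 9600 then 8
     else if n < 9900 then 9 else if n < 9949 then 10 else if n < 9998 then 11 else if n < 10000 then 12 else 1) := by
  norm_num [determine_token_id, pvLoopA, PySem.List.enumerate]

lemma pvRegion0 (n : Int) (hhi : n < 2300) : determine_token_id_alt n = 1 := by
  have hb : pvBsearch n 0 pvPrefixB.length = 0 := by
    norm_num [pvPrefixB]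
    repeat (rw [pvBsearch]; norm_num [pvPrefixB]; try (first | rw [if_neg (by omega)] | rw [if_pos (by omega)]))
  unfold determine_token_id_alt
  rw [hb]
  norm_num [pvPrefixB]
lemma pvRegion1 (n : Int) (hlo : 2300 ≤ n) (hhi : n < 4600) : determine_token_id_alt n = 2 := by
  have hb : pvBsearch n 0 pvPrefixB.length = 1 := by
    norm_num [pvPrefixB]
    repeat (rw [pvBsearch]; norm_num [pvPrefixB]; try (first | rw [if_neg (by omega)] | rw [if_pos (by omega)]))
  unfold determine_token_id_alt
  rw [hb]
  norm_num [pvPrefixB]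
lemma pvRegion2 (n : Int) (hlo : 4600 ≤ n) (hhi : n < 6900) : determine_token_id_alt n = 3 := by
  have hb : pvBsearch n 0 pvPrefixB.length = 2 := by
    norm_num [pvPrefixB]
    repeat (rw [pvBsearch]; norm_num [pvPrefixB]; try (first | rw [if_neg (by omega)] | rw [if_pos (by omega)]))
  unfold determine_token_id_alt
  rw [hb]
  norm_num [pvPrefixB]
lemma pvRegion3 (n : Int) (hlo : 6900 ≤ n) (hhi : n < 7600) : determine_token_id_alt n = 4 := by
  have hb : pvBsearch n 0 pvPrefixB.length = 3 := by
    norm_num [pvPrefixB]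
    repeat (rw [pvBsearch]; norm_num [pvPrefixB]; try (first | rw [if_neg (by omega)] | rw [if_pos (by omega)]))
  unfold determine_token_id_alt
  rw [hb]
  norm_num [pvPrefixB]
lemma pvRegion4 (n : Int) (hlo : 7600 ≤ n) (hhi : n < 8300) : determine_token_id_alt n = 5 := by
  have hb : pvBsearch n 0 pvPrefixB.length = 4 := by
    norm_num [pvPrefixB]
    repeat (rw [pvBsearch]; norm_num [pvPrefixB]; try (first | rw [if_neg (by omega)] | rw [if_pos (by omega)]))
  unfold determine_token_id_alt
  rw [hb]
  norm_num [pvPrefixB]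
lemma pvRegion5 (n : Int) (hlo : 8300 ≤ n) (hhi : n < 9000) : determine_token_id_alt n = 6 := by
  have hb : pvBsearch n 0 pvPrefixB.length = 5 := by
    norm_num [pvPrefixB]
    repeat (rw [pvBsearch]; norm_num [pvPrefixB]; try (first | rw [if_neg (by omega)] | rw [if_pos (by omega)]))
  unfold determine_token_id_alt
  rw [hb]
  norm_num [pvPrefixB]
lemma pvRegion6 (n : Int) (hlo : 9000 ≤ n) (hhi : n < 9300) : determine_token_id_alt n = 7 := by
  have hb : pvBsearch n 0 pvPrefixB.length = 6 := by
    norm_num [pvPrefixB]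
    repeat (rw [pvBsearch]; norm_num [pvPrefixB]; try (first | rw [if_neg (by omega)] | rw [if_pos (by omega)]))
  unfold determine_token_id_alt
  rw [hb]
  norm_num [pvPrefixB]
lemma pvRegion7 (n : Int) (hlo : 9300 ≤ n) (hhi : n < 9600) : determine_token_id_alt n = 8 := by
  have hb : pvBsearch n 0 pvPrefixB.length = 7 := by
    norm_num [pvPrefixB]
    repeat (rw [pvBsearch]; norm_num [pvPrefixB]; try (first | rw [if_neg (by omega)] | rw [if_pos (by omega)]))
  unfold determine_token_id_alt
  rw [hb]
  norm_num [pvPrefixB]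
lemma pvRegion8 (n : Int) (hlo : 9600 ≤ n) (hhi : n < 9900) : determine_token_id_alt n = 9 := by
  have hb : pvBsearch n 0 pvPrefixB.length = 8 := by
    norm_num [pvPrefixB]
    repeat (rw [pvBsearch]; norm_num [pvPrefixB]; try (first | rw [if_neg (by omega)] | rw [if_pos (by omega)]))
  unfold determine_token_id_alt
  rw [hb]
  norm_num [pvPrefixB]
lemma pvRegion9 (n : Int) (hlo : 9900 ≤ n) (hhi : n < 9949) : determine_token_id_alt n = 10 := by
  have hb : pvBsearch n 0 pvPrefixB.length = 9 := by
    norm_num [pvPrefixB]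
    repeat (rw [pvBsearch]; norm_num [pvPrefixB]; try (first | rw [if_neg (by omega)] | rw [if_pos (by omega)]))
  unfold determine_token_id_alt
  rw [hb]
  norm_num [pvPrefixB]
lemma pvRegion10 (n : Int) (hlo : 9949 ≤ n) (hhi : n < 9998) : determine_token_id_alt n = 11 := by
  have hb : pvBsearch n 0 pvPrefixB.length = 10 := by
    norm_num [pvPrefixB]
    repeat (rw [pvBsearch]; norm_num [pvPrefixB]; try (first | rw [if_neg (by omega)] | rw [if_pos (by omega)]))
  unfold determine_token_id_alt
  rw [hb]
  norm_num [pvPrefixB]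
lemma pvRegion11 (n : Int) (hlo : 9998 ≤ n) (hhi : n < 10000) : determine_token_id_alt n = 12 := by
  have hb : pvBsearch n 0 pvPrefixB.length = 11 := by
    norm_num [pvPrefixB]
    repeat (rw [pvBsearch]; norm_num [pvPrefixB]; try (first | rw [if_neg (by omega)] | rw [if_pos (by omega)]))
  unfold determine_token_id_alt
  rw [hb]
  norm_num [pvPrefixB]
lemma pvRegion12 (n : Int) (hlo : 10000 ≤ n) : determine_token_id_alt n = 1 := by
  have hb : pvBsearch n 0 pvPrefixB.length = 12 := by
    norm_num [pvPrefixB]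
    repeat (rw [pvBsearch]; norm_num [pvPrefixB]; try (first | rw [if_neg (by omega)] | rw [if_pos (by omega)]))
  unfold determine_token_id_alt
  rw [hb]
  norm_num [pvPrefixB]

set_option maxHeartbeats 1600000 in
theorem determine_token_id_spec : Claim_equal_determine_token_id := by
  intro n _
  show determine_token_id n = determine_token_id_alt n
  rw [pvA_char]
  by_cases h0 : n < 2300
  · rw [pvRegion0 n h0]; split_ifs <;> omega
  by_cases h1 : n < 4600
  · rw [pvRegion1 n (by omega) h1]; split_ifs <;> omega
  by_cases h2 : n < 6900
  · rw [pvRegion2 n (by omega) h2]; split_ifs <;> omega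
  by_cases h3 : n < 7600
  · rw [pvRegion3 n (by omega) h3]; split_ifs <;> omega
  by_cases h4 : n < 8300
  · rw [pvRegion4 n (by omega) h4]; split_ifs <;> omega
  by_cases h5 : n < 9000
  · rw [pvRegion5 n (by omega) h5]; split_ifs <;> omega
  by_cases h6 : n < 9300
  · rw [pvRegion6 n (by omega) h6]; split_ifs <;> omega
  by_cases h7 : n < 9600
  · rw [pvRegion7 n (by omega) h7]; split_ifs <;> omega
  by_cases h8 : n < 9900
  · rw [pvRegion8 n (by omega) h8]; split_ifs <;> omega
  by_cases h9 : n < 9949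
  · rw [pvRegion9 n (by omega) h9]; split_ifs <;> omega
  by_cases h10 : n < 9998
  · rw [pvRegion10 n (by omega) h10]; split_ifs <;> omega
  by_cases h11 : n < 10000
  · rw [pvRegion11 n (by omega) h11]; split_ifs <;> omega
  rw [pvRegion12 n (by omega)]; split_ifs <;> omega
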